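-- pv_equiv track=rewrite | github.com/Rahul2k5/cf_codes | tempCodeRunnerFile.py | pair_segments
-- ===== SOURCE A (Python) =====
-- from collections import defaultdict
--
-- def pair_segments(n, x, k_list):
--     covered = defaultdict(int)
--     for i in range(n):
--         for j in range(i + 1, n):
--             covered[x[i]] += 1
--             covered[x[j] + 1] -= 1
--     cover = 0
--     count = defaultdict(int)
--     l = 0
--     sor_keys = sorted(covered.keys())
--     for i in sor_keys:
--         if cover > 0:
--             count[cover] += i - l
--         cover += covered[i]
--         l = i
--     ans = []
--     for k in k_list:
--         ans.append(count.get(k, 0))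
--     return ' '.join(map(str, ans))
-- ===== SOURCE B (Python) =====
-- def pair_segments(n, x, k_list):
--     # Aggregate each index's contribution in one pass instead of enumerating all pairs.
--     covered = {}
--     for i in range(n):
--         if i < n - 1:
--             covered[x[i]] = covered.get(x[i], 0) + (n - 1 - i)
--         if i > 0:
--             covered[x[i] + 1] = covered.get(x[i] + 1, 0) - i
--     keys = sorted(covered)
--     count = {}
--     cover = 0
--     for a, b in zip(keys, keys[1:]):
--         cover += covered[a]
--         if cover > 0:
--             count[cover] = count.get(cover, 0) + (b - a)
--     return ' '.join(str(count.get(k, 0)) for k in k_list)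
-- ===== Notes on version B (the rewrite author's own statement) =====
-- stated objective: faster
-- what changed: B replaces A's O(n^2) enumeration of all index pairs by a single O(n) pass that adds each index's aggregate contribution to the difference dict (covered[x[i]] += n-1-i, covered[x[i]+1] -= i) and sweeps consecutive sorted keys pairwise with zip instead of A's cover/l state loop.
import Mathlib
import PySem

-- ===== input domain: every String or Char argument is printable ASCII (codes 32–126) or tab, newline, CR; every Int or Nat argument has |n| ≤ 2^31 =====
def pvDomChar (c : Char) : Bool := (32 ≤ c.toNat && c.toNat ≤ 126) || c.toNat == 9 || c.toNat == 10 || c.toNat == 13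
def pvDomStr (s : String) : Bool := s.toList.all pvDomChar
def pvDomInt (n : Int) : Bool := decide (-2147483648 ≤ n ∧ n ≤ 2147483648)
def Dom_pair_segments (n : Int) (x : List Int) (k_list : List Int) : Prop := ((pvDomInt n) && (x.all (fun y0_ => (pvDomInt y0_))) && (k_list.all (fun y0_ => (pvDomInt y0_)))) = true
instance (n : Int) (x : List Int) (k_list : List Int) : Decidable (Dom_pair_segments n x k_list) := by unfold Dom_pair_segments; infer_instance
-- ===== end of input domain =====

-- B replaces A's O(n^2) pair enumeration by a single pass adding each index's aggregate
-- contribution (covered[x[i]] += n-1-i, covered[x[i]+1] -= i) and a pairwise sweep over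
-- consecutive sorted keys; objective: faster (asymptotic).

-- ===== PORT A =====
def pair_segments (n : Int) (x : List Int) (k_list : List Int) : String :=
  -- x[i] is ported as pyGetD x i 0; Pre_pair_segments keeps every accessed index in range
  let covered : PySem.Dict Int Int :=
    (PySem.List.pyRange 0 n).foldl (fun d i =>
      (PySem.List.pyRange (i+1) n).foldl (fun d j =>
        (d.modify (PySem.List.pyGetD x i 0) 0 (· + 1)).modify
          (PySem.List.pyGetD x j 0 + 1) 0 (· - 1)) d)
      PySem.Dict.empty
  let sor_keys := PySem.List.sorted covered.keys (fun k => k)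
  let st := sor_keys.foldl (fun (st : Int × PySem.Dict Int Int × Int) i =>
      let count := if st.1 > 0 then st.2.1.modify st.1 0 (· + (i - st.2.2)) else st.2.1
      (st.1 + covered.getD i 0, count, i))
    (0, PySem.Dict.empty, 0)
  let ans := k_list.foldl (fun acc k => acc ++ [st.2.1.getD k 0]) []
  PySem.Str.join " " (ans.map PySem.Int.toStr)

-- ===== PORT B =====
def pair_segments_alt (n : Int) (x : List Int) (k_list : List Int) : String :=
  let covered : PySem.Dict Int Int :=
    (PySem.List.pyRange 0 n).foldl (fun d i =>
      let d := if i < n - 1 then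
          d.insert (PySem.List.pyGetD x i 0) (d.getD (PySem.List.pyGetD x i 0) 0 + (n - 1 - i))
        else d
      if 0 < i then
          d.insert (PySem.List.pyGetD x i 0 + 1) (d.getD (PySem.List.pyGetD x i 0 + 1) 0 - i)
        else d)
      PySem.Dict.empty
  let keys := PySem.List.sorted covered.keys (fun k => k)
  let st := (keys.zip keys.tail).foldl (fun (st : Int × PySem.Dict Int Int) p =>
      let cover := st.1 + covered.getD p.1 0
      (cover, if cover > 0 then st.2.insert cover (st.2.getD cover 0 + (p.2 - p.1)) else st.2))
    (0, PySem.Dict.empty)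
  PySem.Str.join " " (k_list.map (fun k => PySem.Int.toStr (st.2.getD k 0)))

-- ===== PRECONDITION & SPEC =====
-- Pre_ excludes exactly the inputs where Python A raises IndexError: when n ≥ 2 the
-- pair loops read x[0..n-1], so A returns normally iff n < 2 or n ≤ len(x).
def Pre_pair_segments (n : Int) (x : List Int) (k_list : List Int) : Prop :=
  2 ≤ n → n ≤ (x.length : Int)
instance (n : Int) (x : List Int) (k_list : List Int) : Decidable (Pre_pair_segments n x k_list) := by unfold Pre_pair_segments; infer_instance
def pvWitness_pair_segments : Int × List Int × List Int := (3, [1, 2, 5], [1, 2])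

def Spec_pair_segments (n : Int) (x : List Int) (k_list : List Int) (out : String) : Prop := out = pair_segments_alt n x k_list
instance (n : Int) (x : List Int) (k_list : List Int) (out : String) : Decidable (Spec_pair_segments n x k_list out) := by unfold Spec_pair_segments; infer_instance

-- ===== CLAIM (what is proved, stated in full; the proofs are below) =====
def Claim_equal_pair_segments : Prop := ∀ (n : Int) (x : List Int) (k_list : List Int), Dom_pair_segments n x k_list → Pre_pair_segments n x k_list → Spec_pair_segments n x k_list (pair_segments n x k_list)

-- ===== LEMMAS AND PROOFS =====

def applyStream (s : List (Int × Int)) (d : PySem.Dict Int Int) : PySem.Dict Int Int :=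
  s.foldl (fun d p => d.insert p.1 (d.getD p.1 0 + p.2)) d

lemma getD_applyStream (s : List (Int × Int)) (d : PySem.Dict Int Int) (k : Int) :
    (applyStream s d).getD k 0 = d.getD k 0 + (s.map (fun p => if p.1 = k then p.2 else 0)).sum := by
  induction s generalizing d with
  | nil => simp [applyStream]
  | cons p t ih =>
    simp only [applyStream, List.foldl_cons, List.map_cons, List.sum_cons] at *
    rw [ih, PySem.Dict.getD_insert]
    by_cases h : k = p.1
    · subst h; simp; ring
    · rw [if_neg h, if_neg (fun hh => h hh.symm)]; ring

lemma keys_applyStream (s : List (Int × Int)) :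
    (applyStream s PySem.Dict.empty).keys = PySem.Set.ofList (s.map (·.1)) := by
  rw [applyStream, PySem.Dict.keys_foldl_insert_key s (·.1) (fun d p => d.getD p.1 0 + p.2)]
  simp [PySem.Set.ofList_eq_foldl, PySem.Set.update]

def streamA (n : Int) (x : List Int) : List (Int × Int) :=
  (PySem.List.pyRange 0 n).flatMap (fun i =>
    (PySem.List.pyRange (i+1) n).flatMap (fun j =>
      [(PySem.List.pyGetD x i 0, 1), (PySem.List.pyGetD x j 0 + 1, -1)]))

def streamB (n : Int) (x : List Int) : List (Int × Int) :=
  (PySem.List.pyRange 0 n).flatMap (fun i =>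
    (if i < n - 1 then [(PySem.List.pyGetD x i 0, n - 1 - i)] else []) ++
    (if 0 < i then [(PySem.List.pyGetD x i 0 + 1, -i)] else []))

lemma covA_eq (n : Int) (x : List Int) :
    (PySem.List.pyRange 0 n).foldl (fun d i =>
      (PySem.List.pyRange (i+1) n).foldl (fun d j =>
        (d.modify (PySem.List.pyGetD x i 0) 0 (· + 1)).modify
          (PySem.List.pyGetD x j 0 + 1) 0 (· - 1)) d)
      PySem.Dict.empty = applyStream (streamA n x) PySem.Dict.empty := by
  simp only [applyStream, streamA, List.foldl_flatMap, List.foldl_cons, List.foldl_nil]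
  rfl

lemma covB_eq (n : Int) (x : List Int) :
    (PySem.List.pyRange 0 n).foldl (fun d i =>
      let d := if i < n - 1 then
          d.insert (PySem.List.pyGetD x i 0) (d.getD (PySem.List.pyGetD x i 0) 0 + (n - 1 - i))
        else d
      if 0 < i then
          d.insert (PySem.List.pyGetD x i 0 + 1) (d.getD (PySem.List.pyGetD x i 0 + 1) 0 - i)
        else d)
      PySem.Dict.empty = applyStream (streamB n x) PySem.Dict.empty := by
  simp only [applyStream, streamB, List.foldl_flatMap, List.foldl_append]
  congr 1
  funext d i
  split_ifs <;> simp [List.foldl] <;> rfl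

lemma mem_fst_streamA_iff (n : Int) (x : List Int) (k : Int) :
    k ∈ (streamA n x).map (·.1) ↔ k ∈ (streamB n x).map (·.1) := by
  simp only [streamA, streamB, List.map_flatMap, List.mem_flatMap, List.map_append,
    List.mem_append, PySem.List.mem_pyRange_one, List.map_cons, List.map_nil,
    List.mem_cons, List.not_mem_nil, apply_ite (List.map (fun p : Int × Int => p.1)),
    List.mem_ite_nil_right, or_false]
  constructor
  · rintro ⟨i, hi, ⟨j, hj, h | h⟩⟩
    · exact ⟨i, hi, Or.inl ⟨by omega, h⟩⟩
    · exact ⟨j, ⟨by omega, hj.2⟩, Or.inr ⟨by omega, h⟩⟩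
  · rintro ⟨i, hi, h | h⟩
    · exact ⟨i, hi, i + 1, ⟨le_refl _, by omega⟩, Or.inl h.2⟩
    · exact ⟨i - 1, ⟨by omega, by omega⟩, i, ⟨by omega, hi.2⟩, Or.inr h.2⟩

lemma triNat (m : Nat) (a b : Int → Int) :
    ((PySem.List.pyRange 0 m).map (fun i => ((PySem.List.pyRange (i+1) m).map (fun j => a i + b j)).sum)).sum
    = ((PySem.List.pyRange 0 m).map (fun i => ((m : Int) - 1 - i) * a i + i * b i)).sum := by
  induction m with
  | zero => simp [PySem.List.pyRange_one_eq_nil]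
  | succ m ih =>
    have hcast : ((m + 1 : Nat) : Int) = (m : Int) + 1 := by push_cast; ring
    have h1 : PySem.List.pyRange 0 ((m : Int) + 1) = PySem.List.pyRange 0 m ++ [(m : Int)] :=
      PySem.List.pyRange_one_succ_right (by positivity)
    have h2 : ∀ i ∈ PySem.List.pyRange 0 (m : Int),
        ((PySem.List.pyRange (i+1) ((m:Int)+1)).map (fun j => a i + b j)).sum
          = ((PySem.List.pyRange (i+1) m).map (fun j => a i + b j)).sum + (a i + b m) := by
      intro i hi
      rw [PySem.List.mem_pyRange_one] at hi
      rw [PySem.List.pyRange_one_succ_right (by omega), List.map_append, List.sum_append]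
      simp
    have h3 : ∀ i ∈ PySem.List.pyRange 0 (m : Int),
        ((m:Int) + 1 - 1 - i) * a i + i * b i
          = (((m:Int) - 1 - i) * a i + i * b i) + a i := by intro i _; ring
    rw [hcast, h1, List.map_append, List.sum_append, List.map_append, List.sum_append]
    rw [List.map_congr_left h2, List.map_congr_left h3]
    rw [PySem.List.sum_map_add_int, PySem.List.sum_map_add_int, ih, PySem.List.sum_map_add_int]
    rw [PySem.List.sum_map_const_int, PySem.List.length_pyRange_one]
    simp [PySem.List.pyRange_one_eq_nil]
    ring

lemma sum_flatMap_int {α : Type} (l : List α) (f : α → List Int) :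
    (l.flatMap f).sum = (l.map (fun i => (f i).sum)).sum := by
  induction l with | nil => simp | cons h t ih => simp [ih]

lemma sum_streamA_eq (n : Int) (x : List Int) (k : Int) :
    ((streamA n x).map (fun p => if p.1 = k then p.2 else 0)).sum
      = ((streamB n x).map (fun p => if p.1 = k then p.2 else 0)).sum := by
  rcases n with m | m
  case negSucc =>
    simp [streamA, streamB, PySem.List.pyRange_one_eq_nil (show (Int.negSucc m) ≤ 0 by omega)]
  case ofNat =>
    show ((streamA (m : Int) x).map _).sum = ((streamB (m : Int) x).map _).sum
    simp only [streamA, streamB, List.map_flatMap, sum_flatMap_int, List.map_cons, List.map_nil, List.sum_cons, List.sum_nil,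
      List.map_append, List.sum_append, apply_ite (List.map (fun p : Int × Int => if p.1 = k then p.2 else 0)),
      apply_ite (List.sum (α := Int)), add_zero]
    rw [triNat m (fun i => if PySem.List.pyGetD x i 0 = k then 1 else 0)
        (fun j => if PySem.List.pyGetD x j 0 + 1 = k then -1 else 0)]
    apply congrArg
    apply List.map_congr_left
    intro i hi
    rw [PySem.List.mem_pyRange_one] at hi
    split_ifs <;> simp <;> omega

lemma sweep_go (δ : Int → Int) (ks : List Int) : ∀ (a c : Int) (cnt : PySem.Dict Int Int),
    (ks.foldl (fun (st : Int × PySem.Dict Int Int × Int) i =>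
        (st.1 + δ i, if st.1 > 0 then st.2.1.modify st.1 0 (· + (i - st.2.2)) else st.2.1, i))
      (c + δ a, cnt, a)).2.1
    = (((a :: ks).zip ks).foldl (fun (st : Int × PySem.Dict Int Int) p =>
        (st.1 + δ p.1, if st.1 + δ p.1 > 0 then
          st.2.insert (st.1 + δ p.1) (st.2.getD (st.1 + δ p.1) 0 + (p.2 - p.1)) else st.2))
        (c, cnt)).2 := by
  induction ks with
  | nil => intro a c cnt; rfl
  | cons b t ih =>
    intro a c cnt
    show (t.foldl _ ((c + δ a) + δ b, _, b)).2.1 = ((((b :: t).zip t)).foldl _ (c + δ a, _)).2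
    exact ih b (c + δ a) _

lemma sweep_eq (δ : Int → Int) (ks : List Int) :
    (ks.foldl (fun (st : Int × PySem.Dict Int Int × Int) i =>
        (st.1 + δ i, if st.1 > 0 then st.2.1.modify st.1 0 (· + (i - st.2.2)) else st.2.1, i))
      (0, PySem.Dict.empty, 0)).2.1
    = ((ks.zip ks.tail).foldl (fun (st : Int × PySem.Dict Int Int) p =>
        (st.1 + δ p.1, if st.1 + δ p.1 > 0 then
          st.2.insert (st.1 + δ p.1) (st.2.getD (st.1 + δ p.1) 0 + (p.2 - p.1)) else st.2))
        (0, PySem.Dict.empty)).2 := by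
  cases ks with
  | nil => rfl
  | cons k0 t =>
    have h := sweep_go δ t k0 0 PySem.Dict.empty
    simpa using h

lemma getD_cov_eq (n : Int) (x : List Int) (k : Int) :
    (applyStream (streamA n x) PySem.Dict.empty).getD k 0
      = (applyStream (streamB n x) PySem.Dict.empty).getD k 0 := by
  rw [getD_applyStream, getD_applyStream, sum_streamA_eq]

lemma sorted_keys_eq (n : Int) (x : List Int) :
    PySem.List.sorted (applyStream (streamA n x) PySem.Dict.empty).keys (fun k => k)
      = PySem.List.sorted (applyStream (streamB n x) PySem.Dict.empty).keys (fun k => k) := by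
  rw [keys_applyStream, keys_applyStream]
  apply PySem.List.sorted_eq_sorted_of_perm _ _ _ (fun a b h => h)
  rw [List.perm_ext_iff_of_nodup (PySem.Set.nodup_ofList _) (PySem.Set.nodup_ofList _)]
  intro a
  rw [PySem.Set.mem_ofList, PySem.Set.mem_ofList]
  exact mem_fst_streamA_iff n x a

-- ===== VERDICT (by name: the statement is the Claim_ definition above) =====
theorem pair_segments_spec : Claim_equal_pair_segments := by
  intro n x k_list _dom _pre
  show pair_segments n x k_list = pair_segments_alt n x k_list
  simp only [pair_segments, pair_segments_alt]
  rw [covA_eq, covB_eq, sorted_keys_eq]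
  simp only [getD_cov_eq n x]
  rw [sweep_eq (fun k => (applyStream (streamB n x) PySem.Dict.empty).getD k 0)]
  rw [PySem.List.foldl_append_singleton_eq_map, List.nil_append, List.map_map]
  rfl
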